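-- pv_equiv track=rewrite | github.com/balavinaithirthan/x-drop | wfa_edit.py | compute_W_2
-- ===== SOURCE A (Python) =====
-- def compute_W_2(P, T):
--     m = len(P)
--     n = len(T)
--     numDiags = m + n + 1  # number of diagonals, corresponds to max_e
--     max_e = n  # maximum possible edit distance
--     diag_offset_wfa_arr = m  # offset is where the diagonal 0 is, ie the number of rows (negative diagonals)
--     diag_end = n - m + diag_offset_wfa_arr
--     W = [[-1] * (numDiags) for _ in range(max_e + 1)]
--     W[0][diag_offset_wfa_arr] = 0  # W[0][0] = 0
--     v = W[0][diag_offset_wfa_arr]  # make offset for 0,0 is diagonal 0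
--     h = W[0][diag_offset_wfa_arr]
--     while v < len(P) and h < len(T) and P[v] == T[h]:
--         v += 1
--         h += 1
--         W[0][diag_offset_wfa_arr + 0] += 1
--     off = W[0][diag_end]
--     if off == n:
--         return W, 0
--     for e in range(1, max_e + 1):
--         # compute value
--         for k in range(-e, e + 1):
--             idx = diag_offset_wfa_arr + k
--             W[e][idx] = max(
--                 W[e - 1][idx - 1] + 1, W[e - 1][idx] + 1, W[e - 1][idx + 1]
--             )  # deletion, mismatch, insertion
--         # extend W[e][k]
--         for k in range(-e, e + 1):
--             idx = diag_offset_wfa_arr + k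
--             v = W[e][idx] - k
--             h = W[e][idx]
--
--             while v < len(P) and h < len(T) and P[v] == T[h]:
--                 v += 1
--                 h += 1
--                 W[e][idx] += 1
--             # check only diagonal 0
--         off = W[e][diag_end]
--         if off == n:
--             return W, e
--
--     return W, e  # fallback in case no match found
-- ===== SOURCE B (Python) =====
-- # Wavefront edit distance where each diagonal extension is a single lookup in a
-- # precomputed longest-common-extension table, and only computed wavefront rows are
-- # materialized (the remaining rows are padded on return).
-- def compute_W_2(P, T):
--     m, n = len(P), len(T)
--     numDiags = m + n + 1
--     off0 = m
--     diag_end = n - m + off0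
--     # lce[v][h] = length of the longest common prefix of P[v:] and T[h:]
--     lce = [[0] * (n + 1) for _ in range(m + 1)]
--     for v in range(m - 1, -1, -1):
--         for h in range(n - 1, -1, -1):
--             if P[v] == T[h]:
--                 lce[v][h] = lce[v + 1][h + 1] + 1
--
--     def ext(v, h):
--         return lce[v][h] if v <= m and h <= n else 0
--
--     cur = [-1] * numDiags
--     cur[off0] = ext(0, 0)
--     rows = [cur]
--     e = 0
--     while cur[diag_end] != n and e < n:
--         e += 1
--         prev, cur = cur, [-1] * numDiags
--         for idx in range(off0 - e, off0 + e + 1):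
--             cur[idx] = max(prev[idx - 1] + 1, prev[idx] + 1, prev[idx + 1])
--         for k in range(-e, e + 1):
--             t = cur[off0 + k]
--             cur[off0 + k] = t + ext(t - k, t)
--         rows.append(cur)
--     rows.extend([-1] * numDiags for _ in range(n - e))
--     return rows, e
-- ===== Notes on version B (the rewrite author's own statement) =====
-- stated objective: alternative
-- what changed: Each diagonal extension becomes a single lookup in a longest-common-extension table precomputed by dynamic programming over P and T, and the wavefront matrix is built by appending one row per wave (padding untouched rows on return) instead of character-scanning while-loops inside a preallocated matrix; Pre_ excludes exactly the inputs on which A raises (IndexError/UnboundLocalError whenever P != T and the edit distance equals len(T)).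
import Mathlib
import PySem

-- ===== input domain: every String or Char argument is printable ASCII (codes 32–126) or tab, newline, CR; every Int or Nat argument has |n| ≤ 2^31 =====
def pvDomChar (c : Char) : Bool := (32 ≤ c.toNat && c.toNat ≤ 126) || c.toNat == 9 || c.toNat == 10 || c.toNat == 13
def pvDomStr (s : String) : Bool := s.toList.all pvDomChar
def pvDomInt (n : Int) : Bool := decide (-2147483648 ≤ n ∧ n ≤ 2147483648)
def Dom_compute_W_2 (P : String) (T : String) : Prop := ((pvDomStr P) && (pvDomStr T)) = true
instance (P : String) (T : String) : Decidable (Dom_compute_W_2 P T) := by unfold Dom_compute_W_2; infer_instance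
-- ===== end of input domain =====

-- B replaces A's per-cell character-scanning extension while-loops by single lookups in a
-- longest-common-extension table built once by dynamic programming, and materializes the
-- wavefront matrix row by row instead of mutating a preallocated one; return values agree
-- on Pre_ (exactly the inputs where the Python A returns).

-- ===== PORT A =====

-- total row read: Python raises IndexError outside [-len, len) (such reads only happen
-- on inputs outside Pre_); -1 default is arbitrary there
def pvFetchA (row : List Int) (i : Int) : Int := PySem.List.pyGetD row i (-1)

-- the while loop 'while v < len(P) and h < len(T) and P[v] == T[h]' counted as number
-- of iterations (the Python increments W[e][idx] once per iteration); where Python's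
-- P[v] would raise (v < -len(P)), pyGet? is none and the loop stops (outside Pre_)
def pvExtA (PL TL : List Char) (v h : Int) : Int :=
  if hc : v < (PL.length : Int) ∧ h < (TL.length : Int) ∧
      (PySem.List.pyGet? PL v).isSome ∧ PySem.List.pyGet? PL v = PySem.List.pyGet? TL h then
    1 + pvExtA PL TL (v + 1) (h + 1)
  else 0
termination_by ((TL.length : Int) - h).toNat
decreasing_by
  have := hc.2.1; omega

-- 'for e in range(1, max_e + 1)' with the early return
def pvLoopA (PL TL : List Char) : Nat → List (List Int) → Nat → List (List Int) × Int
  | 0, W, _ => (W, (TL.length : Int))  -- fallback 'return W, e' (e = max_e; unreachable inside Pre_)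
  | fuel + 1, W, e =>
    let m : Int := PL.length
    let n : Int := TL.length
    let prev := PySem.List.pyGetD W ((e : Int) - 1) []
    let row := PySem.List.pyGetD W (e : Int) []
    let row := (PySem.List.pyRange (-(e : Int)) ((e : Int) + 1) 1).foldl (fun r k =>
      let idx := m + k
      PySem.List.pySetD r idx
        (max (max (pvFetchA prev (idx - 1) + 1) (pvFetchA prev idx + 1))
          (pvFetchA prev (idx + 1)))) row
    let row := (PySem.List.pyRange (-(e : Int)) ((e : Int) + 1) 1).foldl (fun r k =>
      let idx := m + k
      let val := pvFetchA r idx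
      PySem.List.pySetD r idx (val + pvExtA PL TL (val - k) val)) row
    let W := PySem.List.pySetD W (e : Int) row
    if pvFetchA row (n - m + m) = n then (W, (e : Int)) else pvLoopA PL TL fuel W (e + 1)

def compute_W_2 (P : String) (T : String) : List (List Int) × Int :=
  let PL := P.toList
  let TL := T.toList
  let m := PL.length
  let n := TL.length
  let W : List (List Int) := List.replicate (n + 1) (List.replicate (m + n + 1) (-1))
  let row0 := PySem.List.pySetD (PySem.List.pyGetD W 0 []) (m : Int) 0
  let v0 := pvFetchA row0 (m : Int)
  let row0 := PySem.List.pySetD row0 (m : Int) (v0 + pvExtA PL TL v0 v0)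
  let W := PySem.List.pySetD W 0 row0
  if pvFetchA row0 ((n : Int) - m + m) = (n : Int) then (W, 0) else pvLoopA PL TL n W 1

-- ===== PORT B =====

-- Source B's inner 'for h in range(n-1, -1, -1)' row construction: entry h of the LCE row
-- for position v is lce[v+1][h+1]+1 on a character match, else 0 (ns carries nxt[h+1:])
def pvLceGo (pc : Char) : List Char → List Int → List Int
  | [], _ => []
  | c :: cs, ns => (if pc == c then ns.headD 0 + 1 else 0) :: pvLceGo pc cs ns.tail

def pvLceRow (pc : Char) (ts : List Char) (nxt : List Int) : List Int :=
  pvLceGo pc ts (nxt.drop 1) ++ [0]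

-- the full table lce[v][h] for v = 0..m, built from the last row [0]*(n+1) upwards
def pvLce (ts : List Char) : List Char → List (List Int)
  | [] => [List.replicate (ts.length + 1) 0]
  | c :: ps => pvLceRow c ts ((pvLce ts ps).headD []) :: pvLce ts ps

-- Source B's ext: 'lce[v][h] if v <= m and h <= n else 0'
def pvExtB (m n : Nat) (lce : List (List Int)) (v h : Int) : Int :=
  if v ≤ (m : Int) ∧ h ≤ (n : Int) then
    PySem.List.pyGetD (PySem.List.pyGetD lce v []) h 0
  else 0

-- one iteration of Source B's while loop: fresh [-1] row, compute pass over the column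
-- range, then extension pass adding an LCE lookup per diagonal
def pvWaveB (m n : Nat) (lce : List (List Int)) (prev : List Int) (e : Nat) : List Int :=
  let cur : List Int := List.replicate (m + n + 1) (-1)
  let cur := (PySem.List.pyRange ((m : Int) - e) ((m : Int) + e + 1) 1).foldl (fun r idx =>
    PySem.List.pySetD r idx
      (max (max (PySem.List.pyGetD prev (idx - 1) (-1) + 1)
        (PySem.List.pyGetD prev idx (-1) + 1)) (PySem.List.pyGetD prev (idx + 1) (-1)))) cur
  (PySem.List.pyRange (-(e : Int)) ((e : Int) + 1) 1).foldl (fun r k =>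
    let t := PySem.List.pyGetD r ((m : Int) + k) (-1)
    PySem.List.pySetD r ((m : Int) + k) (t + pvExtB m n lce (t - k) t)) cur

-- Source B's 'while cur[diag_end] != n and e < n' (e < n is the fuel), then the padding
def pvLoopB (m n : Nat) (lce : List (List Int)) :
    Nat → List (List Int) → List Int → Nat → List (List Int) × Int
  | 0, rows, _, e => (rows ++ List.replicate (n - e) (List.replicate (m + n + 1) (-1)), (e : Int))
  | fuel + 1, rows, cur, e =>
    if PySem.List.pyGetD cur ((n : Int) - m + m) (-1) = (n : Int) then
      (rows ++ List.replicate (n - e) (List.replicate (m + n + 1) (-1)), (e : Int))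
    else
      let cur' := pvWaveB m n lce cur (e + 1)
      pvLoopB m n lce fuel (rows ++ [cur']) cur' (e + 1)

def compute_W_2_alt (P : String) (T : String) : List (List Int) × Int :=
  let PL := P.toList
  let TL := T.toList
  let m := PL.length
  let n := TL.length
  let lce := pvLce TL PL
  let cur := PySem.List.pySetD (List.replicate (m + n + 1) (-1 : Int)) (m : Int) (pvExtB m n lce 0 0)
  pvLoopB m n lce n [cur] cur 0

-- ===== PRECONDITION & SPEC =====

-- textbook one-row dynamic-programming Levenshtein distance (used only to state Pre_)
def pvLevNext (x : Char) : Nat → List Char → List Nat → List Nat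
  | cur, y :: ys, r0 :: rest =>
      let nv := min (min (cur + 1) (rest.headD 0 + 1)) (r0 + (if x == y then 0 else 1))
      nv :: pvLevNext x nv ys rest
  | _, _, _ => []

def pvLev (xs ys : List Char) : Nat :=
  (xs.foldl (fun row x => (row.headD 0 + 1) :: pvLevNext x (row.headD 0 + 1) ys row)
    (List.range (ys.length + 1))).getLastD 0

-- Pre_ holds exactly where the Python A returns normally: unless P = T or the edit
-- distance is below len(T), A raises before producing a value (UnboundLocalError when
-- T = "" != P, else IndexError when its wavefront loop reaches e = len(T)).
def Pre_compute_W_2 (P : String) (T : String) : Prop :=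
  P = T ∨ pvLev P.toList T.toList < T.length
instance (P : String) (T : String) : Decidable (Pre_compute_W_2 P T) := by
  unfold Pre_compute_W_2; infer_instance

def pvWitness_compute_W_2 : String × String := ("ab", "aab")

def Spec_compute_W_2 (P : String) (T : String) (out : List (List Int) × Int) : Prop :=
  out = compute_W_2_alt P T
instance (P : String) (T : String) (out : List (List Int) × Int) :
    Decidable (Spec_compute_W_2 P T out) := by unfold Spec_compute_W_2; infer_instance

-- ===== CLAIM (what is proved, stated in full; the proofs are below) =====
def Claim_equal_compute_W_2 : Prop := ∀ (P : String) (T : String), Dom_compute_W_2 P T →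
  Pre_compute_W_2 P T → Spec_compute_W_2 P T (compute_W_2 P T)

-- ===== LEMMAS AND PROOFS =====

-- number of equal leading characters of two lists (mathematical value of the LCE table)
def pvSpecCount : List Char → List Char → Int
  | c :: cs, d :: ds => if c == d then pvSpecCount cs ds + 1 else 0
  | _, _ => 0

theorem pvSpecCount_nil_right (xs : List Char) : pvSpecCount xs [] = 0 := by
  cases xs <;> rfl

theorem pvSpecCount_nil_left (ys : List Char) : pvSpecCount [] ys = 0 := by
  cases ys <;> rfl

-- the intended value of table row i: entry j is pvSpecCount (P drop i) (T drop j)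
def pvRowSpec (qs : List Char) : List Char → List Int
  | [] => [0]
  | c :: ts => pvSpecCount qs (c :: ts) :: pvRowSpec qs ts

theorem pvRowSpec_headD (qs ts : List Char) : (pvRowSpec qs ts).headD 0 = pvSpecCount qs ts := by
  cases ts with
  | nil => simp [pvRowSpec, pvSpecCount_nil_right]
  | cons c cs => rfl

theorem pvLceGo_spec (qc : Char) (qs : List Char) : ∀ ts : List Char,
    pvLceGo qc ts ((pvRowSpec qs ts).drop 1) ++ [0] = pvRowSpec (qc :: qs) ts := by
  intro ts
  induction ts with
  | nil => rfl
  | cons c cs ih =>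
      show (if qc == c then (pvRowSpec qs cs).headD 0 + 1 else 0) ::
          (pvLceGo qc cs (pvRowSpec qs cs).tail ++ [0]) = _
      rw [← List.drop_one, ih, pvRowSpec_headD]
      rfl

theorem pvLceRow_spec (qc : Char) (qs rcs : List Char) :
    pvLceRow qc rcs (pvRowSpec qs rcs) = pvRowSpec (qc :: qs) rcs := pvLceGo_spec qc qs rcs

theorem pvRowSpec_nil (rcs : List Char) :
    pvRowSpec [] rcs = List.replicate (rcs.length + 1) 0 := by
  induction rcs with
  | nil => rfl
  | cons c cs ih => simp [pvRowSpec, pvSpecCount, ih, List.replicate_succ]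

theorem pvLce_head (rcs : List Char) : ∀ qs : List Char,
    (pvLce rcs qs).headD [] = pvRowSpec qs rcs := by
  intro qs
  induction qs with
  | nil => simp [pvLce, pvRowSpec_nil]
  | cons c rest ih => simp only [pvLce, List.headD_cons, ih, pvLceRow_spec]

theorem pvLce_getD (rcs : List Char) : ∀ (qs : List Char) (i : Nat), i ≤ qs.length →
    (pvLce rcs qs).getD i [] = pvRowSpec (qs.drop i) rcs := by
  intro qs
  induction qs with
  | nil =>
      intro i hi
      have h0 : i = 0 := Nat.le_zero.mp hi
      subst h0
      simp [pvLce, pvRowSpec_nil]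
  | cons c rest ih =>
      intro i hi
      cases i with
      | zero =>
          have := pvLce_head rcs rest
          simp only [pvLce, List.getD_cons_zero, List.drop_zero, this, pvLceRow_spec]
      | succ j =>
          simp only [pvLce, List.getD_cons_succ, List.drop_succ_cons]
          exact ih j (by simpa using hi)

theorem pvRowSpec_getD (qs rcs : List Char) : ∀ j : Nat,
    (pvRowSpec qs rcs).getD j 0 = pvSpecCount qs (rcs.drop j) := by
  induction rcs generalizing qs with
  | nil =>
      intro j
      cases j <;> simp [pvRowSpec, pvSpecCount_nil_right, List.getD]
  | cons c cs ih =>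
      intro j
      cases j with
      | zero => rfl
      | succ j' => simpa [pvRowSpec] using ih qs j'

theorem pvExtA_spec (PL TL : List Char) : ∀ v h : Nat,
    pvExtA PL TL v h = pvSpecCount (PL.drop v) (TL.drop h) := by
  intro v h
  generalize hfe : TL.length - h = fuel
  induction fuel using Nat.strong_induction_on generalizing v h with
  | _ fuel IH =>
  by_cases hv : v < PL.length
  · by_cases hh : h < TL.length
    · have hq : PySem.List.pyGet? PL (v : Int) = some PL[v] := by
        rw [PySem.List.pyGet?_of_nonneg _ (by positivity)]
        simp [hv]
      have hr : PySem.List.pyGet? TL (h : Int) = some TL[h] := by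
        rw [PySem.List.pyGet?_of_nonneg _ (by positivity)]
        simp [hh]
      rw [List.drop_eq_getElem_cons hv, List.drop_eq_getElem_cons hh]
      by_cases hc : PL[v] = TL[h]
      · rw [pvExtA, dif_pos ⟨by exact_mod_cast hv, by exact_mod_cast hh, by rw [hq]; rfl,
          by rw [hq, hr, hc]⟩]
        have hrec := IH (TL.length - (h+1)) (by omega) (v+1) (h+1) rfl
        push_cast at hrec ⊢
        rw [hrec]
        simp only [pvSpecCount, hc, beq_self_eq_true, if_true]
        omega
      · rw [pvExtA, dif_neg (by
          intro hcc
          obtain ⟨_, _, _, he⟩ := hcc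
          rw [hq, hr] at he
          exact hc (Option.some.inj he))]
        simp only [pvSpecCount]
        rw [if_neg (by simpa using hc)]
    · rw [pvExtA, dif_neg (fun hcc => hh (by exact_mod_cast hcc.2.1))]
      have e1 : List.drop h TL = [] := List.drop_eq_nil_of_le (by omega)
      rw [e1, pvSpecCount_nil_right]
  · rw [pvExtA, dif_neg (fun hcc => hv (by exact_mod_cast hcc.1))]
    have e1 : List.drop v PL = [] := List.drop_eq_nil_of_le (by omega)
    rw [e1, pvSpecCount_nil_left]

theorem pvExtA_nonneg (PL TL : List Char) (v h : Int) : 0 ≤ pvExtA PL TL v h := by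
  generalize hfe : ((TL.length : Int) - h).toNat = fuel
  induction fuel using Nat.strong_induction_on generalizing v h with
  | _ fuel IH =>
  rw [pvExtA]
  split
  · next hc =>
      have := IH (((TL.length : Int) - (h + 1)).toNat) (by have := hc.2.1; omega) (v + 1) (h + 1) rfl
      omega
  · omega

-- agreement of the two extension functions on the nonnegative quadrant
theorem pvExt_eq (PL TL : List Char) (v h : Int) (hv : 0 ≤ v) (hh : 0 ≤ h) :
    pvExtA PL TL v h = pvExtB PL.length TL.length (pvLce TL PL) v h := by
  by_cases hvm : v ≤ (PL.length : Int)
  · by_cases hhn : h ≤ (TL.length : Int)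
    · have hv' : v = ((v.toNat : Nat) : Int) := by omega
      have hh' : h = ((h.toNat : Nat) : Int) := by omega
      rw [pvExtB, if_pos ⟨hvm, hhn⟩, hv', hh', PySem.List.pyGetD_natCast,
        PySem.List.pyGetD_natCast, pvLce_getD _ _ _ (by omega), pvRowSpec_getD,
        ← hv', ← hh']
      have := pvExtA_spec PL TL v.toNat h.toNat
      rw [hv', hh', this]
      rfl
    · rw [pvExtB, if_neg (fun hcc => hhn hcc.2)]
      rw [pvExtA, dif_neg (fun hcc => hhn (le_of_lt hcc.2.1))]
  · rw [pvExtB, if_neg (fun hcc => hvm hcc.1)]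
    rw [pvExtA, dif_neg (fun hcc => hvm (le_of_lt hcc.1))]

-- ---- Python index bridge: in-range Int indices as Nat positions ----

def pvPos (len : Nat) (i : Int) : Nat := if 0 ≤ i then i.toNat else len - (-i).toNat

theorem pvIdx_eq (len : Nat) (i : Int) (h1 : -(len : Int) ≤ i) (h2 : i < (len : Int)) :
    PySem.List.pyIdx? len i = some (pvPos len i) := by
  unfold PySem.List.pyIdx? pvPos
  split_ifs with ha <;> rfl

theorem pvPos_lt (len : Nat) (i : Int) (h1 : -(len : Int) ≤ i) (h2 : i < (len : Int)) :
    pvPos len i < len := by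
  unfold pvPos; split_ifs <;> omega

theorem pvGet_eq {α : Type} (xs : List α) (i : Int) (d : α)
    (h1 : -(xs.length : Int) ≤ i) (h2 : i < (xs.length : Int)) :
    PySem.List.pyGetD xs i d = xs.getD (pvPos xs.length i) d := by
  unfold PySem.List.pyGetD PySem.List.pyGet?
  rw [pvIdx_eq _ _ h1 h2]
  rfl

theorem pvSet_eq {α : Type} (xs : List α) (i : Int) (v : α)
    (h1 : -(xs.length : Int) ≤ i) (h2 : i < (xs.length : Int)) :
    PySem.List.pySetD xs i v = xs.set (pvPos xs.length i) v := by
  unfold PySem.List.pySetD PySem.List.pySet?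
  rw [pvIdx_eq _ _ h1 h2]
  rfl

theorem pvGetD_setD {α : Type} (xs : List α) (i j : Int) (v : α) (d : α)
    (hi1 : -(xs.length : Int) ≤ i) (hi2 : i < (xs.length : Int))
    (hj1 : -(xs.length : Int) ≤ j) (hj2 : j < (xs.length : Int)) :
    PySem.List.pyGetD (PySem.List.pySetD xs i v) j d =
      if pvPos xs.length j = pvPos xs.length i then v else PySem.List.pyGetD xs j d := by
  rw [pvSet_eq _ _ _ hi1 hi2]
  rw [pvGet_eq _ _ _ (by simpa using hj1) (by simpa using hj2)]
  rw [pvGet_eq _ _ _ hj1 hj2]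
  simp only [List.length_set]
  split_ifs with h
  · rw [h, List.getD_eq_getElem _ _ (by simpa using pvPos_lt _ _ hi1 hi2)]
    rw [List.getElem_set_self]
  · simp [List.getD, List.getElem?_set_ne (Ne.symm h)]

-- ---- row invariants ----

def pvGE (r : List Int) : Prop := ∀ x ∈ r, -1 ≤ x

theorem pvGE_getD (r : List Int) (i : Int) (hGE : pvGE r) :
    -1 ≤ PySem.List.pyGetD r i (-1) := by
  unfold PySem.List.pyGetD
  cases h : PySem.List.pyGet? r i with
  | none => simp
  | some x =>
      simp only [Option.getD_some]
      apply hGE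
      unfold PySem.List.pyGet? at h
      cases hk : PySem.List.pyIdx? r.length i with
      | none => rw [hk] at h; simp at h
      | some k =>
          rw [hk] at h
          simp only [Option.bind_some] at h
          exact List.mem_of_getElem? h

theorem pvGE_set (r : List Int) (p : Nat) (v : Int) (hGE : pvGE r) (hv : -1 ≤ v) :
    pvGE (r.set p v) := by
  intro x hx
  rcases List.mem_or_eq_of_mem_set hx with h | h
  · exact hGE x h
  · omega

-- after wave e, diagonal k of the row is at least max 0 k for |k| ≤ e
def pvInv (m n e : Nat) (r : List Int) : Prop :=
  r.length = m + n + 1 ∧ pvGE r ∧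
    ∀ k : Int, -(e : Int) ≤ k → k ≤ (e : Int) → max 0 k ≤ PySem.List.pyGetD r ((m : Int) + k) (-1)

-- ---- a foldl over a shifted range ----

theorem pvFoldShift {β : Type} (f : β → Int → β) (c : Int) : ∀ (a b : Int) (init : β),
    (PySem.List.pyRange a b 1).foldl (fun r k => f r (c + k)) init =
    (PySem.List.pyRange (c + a) (c + b) 1).foldl f init := by
  intro a b init
  generalize hfe : (b - a).toNat = fuel
  induction fuel generalizing a init with
  | zero =>
      rw [PySem.List.pyRange_one_eq_nil (by omega),
        PySem.List.pyRange_one_eq_nil (a := c + a) (by omega)]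
      rfl
  | succ f' ih =>
      rw [PySem.List.pyRange_one_cons (by omega),
        PySem.List.pyRange_one_cons (a := c + a) (b := c + b) (by omega)]
      simp only [List.foldl_cons]
      rw [ih (a + 1) _ (by omega)]
      rw [show c + a + 1 = c + (a + 1) by ring]

-- A's compute-pass body (shared shape; B folds it over the shifted column range)
def pvStepC (prev : List Int) : List Int → Int → List Int := fun r idx =>
  PySem.List.pySetD r idx
    (max (max (PySem.List.pyGetD prev (idx - 1) (-1) + 1)
      (PySem.List.pyGetD prev idx (-1) + 1)) (PySem.List.pyGetD prev (idx + 1) (-1)))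

-- the compute pass keeps rows ≥ -1 and establishes: diagonal k holds a value ≥ max 0 k
theorem pvComputeInv (m n e' : Nat) (prev : List Int) (hen : e' ≤ n)
    (hprev : pvInv m n (e' - 1) prev) :
    ∀ (fuel : Nat) (a : Int) (r : List Int), ((e' : Int) + 1 - a).toNat = fuel →
    -(e' : Int) ≤ a →
    r.length = m + n + 1 → pvGE r →
    (∀ k : Int, -(e' : Int) ≤ k → k < a → 0 ≤ PySem.List.pyGetD r ((m : Int) + k) (-1)) →
    (∀ j : Int, 1 ≤ j → j < a → j ≤ PySem.List.pyGetD r ((m : Int) + j) (-1)) →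
    ((PySem.List.pyRange a ((e' : Int) + 1) 1).foldl
        (fun r k => pvStepC prev r ((m : Int) + k)) r).length = m + n + 1 ∧
    pvGE ((PySem.List.pyRange a ((e' : Int) + 1) 1).foldl
        (fun r k => pvStepC prev r ((m : Int) + k)) r) ∧
    (∀ k : Int, -(e' : Int) ≤ k → k ≤ (e' : Int) →
      0 ≤ PySem.List.pyGetD ((PySem.List.pyRange a ((e' : Int) + 1) 1).foldl
        (fun r k => pvStepC prev r ((m : Int) + k)) r) ((m : Int) + k) (-1)) ∧
    (∀ j : Int, 1 ≤ j → j ≤ (e' : Int) →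
      j ≤ PySem.List.pyGetD ((PySem.List.pyRange a ((e' : Int) + 1) 1).foldl
        (fun r k => pvStepC prev r ((m : Int) + k)) r) ((m : Int) + j) (-1)) := by
  intro fuel
  induction fuel with
  | zero =>
      intro a r hfe ha hlen hge h0 h1
      rw [PySem.List.pyRange_one_eq_nil (by omega)]
      exact ⟨hlen, hge, fun k hk1 hk2 => h0 k hk1 (by omega),
        fun j hj1 hj2 => h1 j hj1 (by omega)⟩
  | succ f' ih =>
      intro a r hfe ha hlen hge h0 h1
      rw [PySem.List.pyRange_one_cons (by omega)]
      simp only [List.foldl_cons]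
      have hiR1 : -((r.length : Int)) ≤ (m : Int) + a := by omega
      have hiR2 : (m : Int) + a < (r.length : Int) := by omega
      -- the written value
      set vA := max (max (PySem.List.pyGetD prev ((m : Int) + a - 1) (-1) + 1)
        (PySem.List.pyGetD prev ((m : Int) + a) (-1) + 1))
        (PySem.List.pyGetD prev ((m : Int) + a + 1) (-1)) with hvA
      have hstep : pvStepC prev r ((m : Int) + a) = PySem.List.pySetD r ((m : Int) + a) vA := rfl
      have hvA0 : 0 ≤ vA := by
        have := pvGE_getD prev ((m : Int) + a) hprev.2.1
        omega
      have hvAa : 1 ≤ a → a ≤ vA := by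
        intro ha1
        have hb := hprev.2.2 (a - 1) (by omega) (by omega)
        rw [show (m : Int) + (a - 1) = (m : Int) + a - 1 by ring] at hb
        omega
      have hget : ∀ (j : Int), -(e' : Int) ≤ j → j ≤ (e' : Int) →
          PySem.List.pyGetD (PySem.List.pySetD r ((m : Int) + a) vA) ((m : Int) + j) (-1) =
            if pvPos r.length ((m : Int) + j) = pvPos r.length ((m : Int) + a) then vA
            else PySem.List.pyGetD r ((m : Int) + j) (-1) :=
        fun j hj1 hj2 => pvGetD_setD r _ _ _ _ hiR1 hiR2 (by omega) (by omega)
      rw [hstep]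
      apply ih (a + 1) _ (by omega) (by omega)
      · rw [PySem.List.length_pySetD, hlen]
      · rw [pvSet_eq _ _ _ hiR1 hiR2]
        exact pvGE_set _ _ _ hge (by omega)
      · intro k hk1 hk2
        rw [hget k hk1 (by omega)]
        split_ifs with hcol
        · exact hvA0
        · by_cases hka : k = a
          · subst hka; exact absurd rfl hcol
          · exact h0 k hk1 (by omega)
      · intro j hj1 hj2
        by_cases hja : j = a
        · subst hja
          rw [hget j (by omega) (by omega), if_pos rfl]
          exact hvAa hj1
        · rw [hget j (by omega) (by omega)]
          have hne : pvPos r.length ((m : Int) + j) ≠ pvPos r.length ((m : Int) + a) := by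
            unfold pvPos
            split_ifs <;> omega
          rw [if_neg hne]
          exact h1 j hj1 (by omega)

-- the extension pass: A's while-loop counts and B's table lookups coincide on every
-- cell the pass touches (the compute pass guarantees t ≥ 0 and t - k ≥ 0), and the
-- lower bounds are preserved (each write only increases its cell)
theorem pvExtendLoop (PL TL : List Char) (m n e' : Nat) (hm : m = PL.length)
    (hn : n = TL.length) (hen : e' ≤ n) :
    ∀ (fuel : Nat) (a : Int) (r : List Int), ((e' : Int) + 1 - a).toNat = fuel →
    -(e' : Int) ≤ a →
    r.length = m + n + 1 → pvGE r →
    (∀ k : Int, -(e' : Int) ≤ k → k ≤ (e' : Int) →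
      0 ≤ PySem.List.pyGetD r ((m : Int) + k) (-1)) →
    (∀ j : Int, 1 ≤ j → j ≤ (e' : Int) →
      j ≤ PySem.List.pyGetD r ((m : Int) + j) (-1)) →
    ((PySem.List.pyRange a ((e' : Int) + 1) 1).foldl
        (fun r k => PySem.List.pySetD r ((m : Int) + k)
          (PySem.List.pyGetD r ((m : Int) + k) (-1) +
            pvExtA PL TL (PySem.List.pyGetD r ((m : Int) + k) (-1) - k)
              (PySem.List.pyGetD r ((m : Int) + k) (-1)))) r =
      (PySem.List.pyRange a ((e' : Int) + 1) 1).foldl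
        (fun r k => PySem.List.pySetD r ((m : Int) + k)
          (PySem.List.pyGetD r ((m : Int) + k) (-1) +
            pvExtB m n (pvLce TL PL) (PySem.List.pyGetD r ((m : Int) + k) (-1) - k)
              (PySem.List.pyGetD r ((m : Int) + k) (-1)))) r) ∧
    (((PySem.List.pyRange a ((e' : Int) + 1) 1).foldl
        (fun r k => PySem.List.pySetD r ((m : Int) + k)
          (PySem.List.pyGetD r ((m : Int) + k) (-1) +
            pvExtA PL TL (PySem.List.pyGetD r ((m : Int) + k) (-1) - k)
              (PySem.List.pyGetD r ((m : Int) + k) (-1)))) r).length = m + n + 1 ∧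
      pvGE ((PySem.List.pyRange a ((e' : Int) + 1) 1).foldl
        (fun r k => PySem.List.pySetD r ((m : Int) + k)
          (PySem.List.pyGetD r ((m : Int) + k) (-1) +
            pvExtA PL TL (PySem.List.pyGetD r ((m : Int) + k) (-1) - k)
              (PySem.List.pyGetD r ((m : Int) + k) (-1)))) r) ∧
      (∀ k : Int, -(e' : Int) ≤ k → k ≤ (e' : Int) →
        max 0 k ≤ PySem.List.pyGetD ((PySem.List.pyRange a ((e' : Int) + 1) 1).foldl
          (fun r k => PySem.List.pySetD r ((m : Int) + k)
            (PySem.List.pyGetD r ((m : Int) + k) (-1) +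
              pvExtA PL TL (PySem.List.pyGetD r ((m : Int) + k) (-1) - k)
                (PySem.List.pyGetD r ((m : Int) + k) (-1)))) r) ((m : Int) + k) (-1))) := by
  intro fuel
  induction fuel with
  | zero =>
      intro a r hfe ha hlen hge h0 h1
      rw [PySem.List.pyRange_one_eq_nil (by omega)]
      simp only [List.foldl_nil]
      refine ⟨trivial, hlen, hge, fun k hk1 hk2 => ?_⟩
      have := h0 k hk1 hk2
      by_cases hk : (1 : Int) ≤ k
      · have := h1 k hk hk2; omega
      · omega
  | succ f' ih =>
      intro a r hfe ha hlen hge h0 h1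
      rw [PySem.List.pyRange_one_cons (by omega)]
      simp only [List.foldl_cons]
      have hiR1 : -((r.length : Int)) ≤ (m : Int) + a := by omega
      have hiR2 : (m : Int) + a < (r.length : Int) := by omega
      set t := PySem.List.pyGetD r ((m : Int) + a) (-1) with ht
      have ht0 : 0 ≤ t := h0 a ha (by omega)
      have hta : 0 ≤ t - a := by
        by_cases ha1 : (1 : Int) ≤ a
        · have := h1 a ha1 (by omega); omega
        · omega
      have hext : pvExtA PL TL (t - a) t = pvExtB m n (pvLce TL PL) (t - a) t := by
        rw [hm, hn]; exact pvExt_eq PL TL _ _ hta ht0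
      have hx0 : 0 ≤ pvExtA PL TL (t - a) t := pvExtA_nonneg PL TL _ _
      rw [← hext]
      set r' := PySem.List.pySetD r ((m : Int) + a) (t + pvExtA PL TL (t - a) t) with hr'
      have hget : ∀ (j : Int), -(e' : Int) ≤ j → j ≤ (e' : Int) →
          PySem.List.pyGetD r' ((m : Int) + j) (-1) =
            if pvPos r.length ((m : Int) + j) = pvPos r.length ((m : Int) + a) then
              t + pvExtA PL TL (t - a) t
            else PySem.List.pyGetD r ((m : Int) + j) (-1) :=
        fun j hj1 hj2 => pvGetD_setD r _ _ _ _ hiR1 hiR2 (by omega) (by omega)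
      -- in the collision case the old value at that cell is t itself
      have hcoll : ∀ (j : Int), -(e' : Int) ≤ j → j ≤ (e' : Int) →
          pvPos r.length ((m : Int) + j) = pvPos r.length ((m : Int) + a) →
          PySem.List.pyGetD r ((m : Int) + j) (-1) = t := by
        intro j hj1 hj2 hcol
        rw [ht, pvGet_eq _ _ _ (by omega) (by omega), pvGet_eq _ _ _ hiR1 hiR2, hcol]
      have hlen' : r'.length = m + n + 1 := by
        rw [hr', PySem.List.length_pySetD, hlen]
      apply ih (a + 1) r' (by omega) (by omega) hlen'
      · rw [hr', pvSet_eq _ _ _ hiR1 hiR2]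
        exact pvGE_set _ _ _ hge (by omega)
      · intro k hk1 hk2
        rw [hget k hk1 hk2]
        split_ifs with hcol
        · omega
        · exact h0 k hk1 hk2
      · intro j hj1 hj2
        rw [hget j (by omega) hj2]
        split_ifs with hcol
        · have := hcoll j (by omega) hj2 hcol
          have := h1 j hj1 hj2
          omega
        · exact h1 j hj1 hj2

-- one whole wave: A's pair of passes (on a fresh [-1] row) equals B's pvWaveB, and the
-- resulting row satisfies the wavefront invariant
theorem pvWave_eq (PL TL : List Char) (m n : Nat) (hm : m = PL.length) (hn : n = TL.length)
    (e' : Nat) (hen : e' ≤ n) (prev : List Int) (hprev : pvInv m n (e' - 1) prev) :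
    ((PySem.List.pyRange (-(e' : Int)) ((e' : Int) + 1) 1).foldl
        (fun r k => PySem.List.pySetD r ((m : Int) + k)
          (PySem.List.pyGetD r ((m : Int) + k) (-1) +
            pvExtA PL TL (PySem.List.pyGetD r ((m : Int) + k) (-1) - k)
              (PySem.List.pyGetD r ((m : Int) + k) (-1))))
        ((PySem.List.pyRange (-(e' : Int)) ((e' : Int) + 1) 1).foldl
          (fun r k => pvStepC prev r ((m : Int) + k)) (List.replicate (m + n + 1) (-1))) =
      pvWaveB m n (pvLce TL PL) prev e') ∧
    pvInv m n e'
      ((PySem.List.pyRange (-(e' : Int)) ((e' : Int) + 1) 1).foldl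
        (fun r k => PySem.List.pySetD r ((m : Int) + k)
          (PySem.List.pyGetD r ((m : Int) + k) (-1) +
            pvExtA PL TL (PySem.List.pyGetD r ((m : Int) + k) (-1) - k)
              (PySem.List.pyGetD r ((m : Int) + k) (-1))))
        ((PySem.List.pyRange (-(e' : Int)) ((e' : Int) + 1) 1).foldl
          (fun r k => pvStepC prev r ((m : Int) + k)) (List.replicate (m + n + 1) (-1)))) := by
  have hcomp := pvComputeInv m n e' prev hen hprev (((e' : Int) + 1 - (-(e' : Int))).toNat)
    (-(e' : Int)) (List.replicate (m + n + 1) (-1)) rfl (le_refl _)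
    (by simp) (by intro x hx; rw [List.eq_of_mem_replicate hx])
    (by intro k hk1 hk2; omega) (by intro j hj1 hj2; omega)
  obtain ⟨hclen, hcge, hc0, hc1⟩ := hcomp
  have hext := pvExtendLoop PL TL m n e' hm hn hen (((e' : Int) + 1 - (-(e' : Int))).toNat)
    (-(e' : Int)) _ rfl (le_refl _) hclen hcge hc0 hc1
  obtain ⟨heq, helen, hege, hebnd⟩ := hext
  constructor
  · rw [heq]
    show _ = (PySem.List.pyRange (-(e' : Int)) ((e' : Int) + 1) 1).foldl _
      ((PySem.List.pyRange ((m : Int) - (e' : Int)) ((m : Int) + (e' : Int) + 1) 1).foldl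
        (pvStepC prev) (List.replicate (m + n + 1) (-1)))
    have hshift := pvFoldShift (pvStepC prev) (m : Int) (-(e' : Int)) ((e' : Int) + 1)
      (List.replicate (m + n + 1) (-1))
    rw [show (m : Int) + -(e' : Int) = (m : Int) - (e' : Int) by ring,
      show (m : Int) + ((e' : Int) + 1) = (m : Int) + (e' : Int) + 1 by ring] at hshift
    rw [hshift]
  · exact ⟨helen, hege, hebnd⟩

-- pvLoopA's successor step with lets unfolded (definitional)
theorem pvLoopA_succ (PL TL : List Char) (fuel : Nat) (W : List (List Int)) (e : Nat) :
    pvLoopA PL TL (fuel + 1) W e =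
      (if pvFetchA
          ((PySem.List.pyRange (-(e : Int)) ((e : Int) + 1) 1).foldl
            (fun r k => PySem.List.pySetD r ((PL.length : Int) + k)
              (PySem.List.pyGetD r ((PL.length : Int) + k) (-1) +
                pvExtA PL TL (PySem.List.pyGetD r ((PL.length : Int) + k) (-1) - k)
                  (PySem.List.pyGetD r ((PL.length : Int) + k) (-1))))
            ((PySem.List.pyRange (-(e : Int)) ((e : Int) + 1) 1).foldl
              (fun r k => pvStepC (PySem.List.pyGetD W ((e : Int) - 1) []) r
                ((PL.length : Int) + k)) (PySem.List.pyGetD W (e : Int) [])))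
          ((TL.length : Int) - PL.length + PL.length) = (TL.length : Int) then
        (PySem.List.pySetD W (e : Int)
          ((PySem.List.pyRange (-(e : Int)) ((e : Int) + 1) 1).foldl
            (fun r k => PySem.List.pySetD r ((PL.length : Int) + k)
              (PySem.List.pyGetD r ((PL.length : Int) + k) (-1) +
                pvExtA PL TL (PySem.List.pyGetD r ((PL.length : Int) + k) (-1) - k)
                  (PySem.List.pyGetD r ((PL.length : Int) + k) (-1))))
            ((PySem.List.pyRange (-(e : Int)) ((e : Int) + 1) 1).foldl
              (fun r k => pvStepC (PySem.List.pyGetD W ((e : Int) - 1) []) r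
                ((PL.length : Int) + k)) (PySem.List.pyGetD W (e : Int) []))), (e : Int))
      else
        pvLoopA PL TL fuel
          (PySem.List.pySetD W (e : Int)
            ((PySem.List.pyRange (-(e : Int)) ((e : Int) + 1) 1).foldl
              (fun r k => PySem.List.pySetD r ((PL.length : Int) + k)
                (PySem.List.pyGetD r ((PL.length : Int) + k) (-1) +
                  pvExtA PL TL (PySem.List.pyGetD r ((PL.length : Int) + k) (-1) - k)
                    (PySem.List.pyGetD r ((PL.length : Int) + k) (-1))))
              ((PySem.List.pyRange (-(e : Int)) ((e : Int) + 1) 1).foldl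
                (fun r k => pvStepC (PySem.List.pyGetD W ((e : Int) - 1) []) r
                  ((PL.length : Int) + k)) (PySem.List.pyGetD W (e : Int) []))))
          (e + 1)) := rfl

theorem pvLoopB_stop (m n : Nat) (lce : List (List Int)) (rows : List (List Int))
    (cur : List Int) (e : Nat)
    (hsucc : PySem.List.pyGetD cur ((n : Int) - m + m) (-1) = (n : Int)) :
    ∀ fuel : Nat, pvLoopB m n lce fuel rows cur e =
      (rows ++ List.replicate (n - e) (List.replicate (m + n + 1) (-1)), (e : Int))
  | 0 => rfl
  | fuel + 1 => by rw [pvLoopB, if_pos hsucc]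

-- the main loop: A's in-place updates of the preallocated matrix produce exactly
-- B's appended rows plus the untouched padding
theorem pvLoop_eq (PL TL : List Char) (m n : Nat) (hm : m = PL.length) (hn : n = TL.length) :
    ∀ (fuel : Nat) (rs : List (List Int)) (cur : List Int) (e : Nat),
    rs.length = e → e + fuel = n → pvInv m n e cur →
    PySem.List.pyGetD cur ((n : Int) - m + m) (-1) ≠ (n : Int) →
    pvLoopA PL TL fuel
        ((rs ++ [cur]) ++ List.replicate fuel (List.replicate (m + n + 1) (-1))) (e + 1) =
      pvLoopB m n (pvLce TL PL) fuel (rs ++ [cur]) cur e := by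
  intro fuel
  induction fuel with
  | zero =>
      intro rs cur e hrs hef hinv hfail
      have hen : e = n := by omega
      subst hen
      show ((rs ++ [cur]) ++ [], (TL.length : Int)) = _
      rw [pvLoopB]
      simp [hn]
  | succ f' ih =>
      intro rs cur e hrs hef hinv hfail
      have hlenW : (rs ++ [cur]).length = e + 1 := by simp [hrs]
      have hprevA : PySem.List.pyGetD
          ((rs ++ [cur]) ++ List.replicate (f' + 1) (List.replicate (m + n + 1) (-1)))
          (((e + 1 : Nat) : Int) - 1) [] = cur := by
        rw [show ((e + 1 : Nat) : Int) - 1 = ((e : Nat) : Int) by push_cast; ring,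
          PySem.List.pyGetD_natCast,
          List.getD_append _ _ _ _ (by simp [hrs]),
          List.getD_append_right _ _ _ _ (by omega)]
        simp [hrs]
      have hrowA : PySem.List.pyGetD
          ((rs ++ [cur]) ++ List.replicate (f' + 1) (List.replicate (m + n + 1) (-1)))
          (((e + 1 : Nat) : Int)) [] = List.replicate (m + n + 1) (-1) := by
        rw [PySem.List.pyGetD_natCast,
          List.getD_append_right _ _ _ _ (by simp [hrs]), List.replicate_succ]
        simp [hrs]
      have hwave := pvWave_eq PL TL m n hm hn (e + 1) (by omega) cur (by simpa using hinv)
      rw [pvLoopA_succ, ← hm, ← hn, hprevA, hrowA]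
      rw [pvLoopB, if_neg hfail]
      have hcur' := hwave.1
      have hinv' := hwave.2
      rw [hcur'] at hinv'
      rw [hcur']
      -- the updated matrix: set position e+1 = append the new row before the padding
      have hsetW : PySem.List.pySetD
          ((rs ++ [cur]) ++ List.replicate (f' + 1) (List.replicate (m + n + 1) (-1)))
          (((e + 1 : Nat) : Int)) (pvWaveB m n (pvLce TL PL) cur (e + 1)) =
          ((rs ++ [cur]) ++ [pvWaveB m n (pvLce TL PL) cur (e + 1)]) ++
            List.replicate f' (List.replicate (m + n + 1) (-1)) := by
        rw [PySem.List.pySetD_natCast, List.replicate_succ,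
          List.set_append_right _ _ (by omega)]
        simp [hrs]
      rw [hsetW]
      by_cases hsucc : pvFetchA (pvWaveB m n (pvLce TL PL) cur (e + 1))
          ((n : Int) - m + m) = (n : Int)
      · rw [if_pos hsucc,
          pvLoopB_stop m n _ _ _ _ hsucc f']
        have : n - (e + 1) = f' := by omega
        rw [this]
      · rw [if_neg hsucc]
        have := ih (rs ++ [cur]) (pvWaveB m n (pvLce TL PL) cur (e + 1)) (e + 1)
          (by simp [hrs]) (by omega) hinv' hsucc
        simpa using this

-- row 0 of both programs, and the top-level assembly
theorem pvRow0_eq (PL TL : List Char) :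
    PySem.List.pySetD
      (PySem.List.pySetD (List.replicate (PL.length + TL.length + 1) (-1 : Int))
        ((PL.length : Int)) 0) ((PL.length : Int))
      (PySem.List.pyGetD (PySem.List.pySetD
          (List.replicate (PL.length + TL.length + 1) (-1 : Int)) ((PL.length : Int)) 0)
          ((PL.length : Int)) (-1) +
        pvExtA PL TL
          (PySem.List.pyGetD (PySem.List.pySetD
            (List.replicate (PL.length + TL.length + 1) (-1 : Int)) ((PL.length : Int)) 0)
            ((PL.length : Int)) (-1))
          (PySem.List.pyGetD (PySem.List.pySetD
            (List.replicate (PL.length + TL.length + 1) (-1 : Int)) ((PL.length : Int)) 0)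
            ((PL.length : Int)) (-1))) =
      (List.replicate (PL.length + TL.length + 1) (-1 : Int)).set PL.length
        (pvExtA PL TL 0 0) := by
  have hset : PySem.List.pySetD (List.replicate (PL.length + TL.length + 1) (-1 : Int))
      ((PL.length : Int)) 0 =
      (List.replicate (PL.length + TL.length + 1) (-1 : Int)).set PL.length 0 :=
    PySem.List.pySetD_natCast _ _ _
  have hv0 : PySem.List.pyGetD (PySem.List.pySetD
      (List.replicate (PL.length + TL.length + 1) (-1 : Int)) ((PL.length : Int)) 0)
      ((PL.length : Int)) (-1) = 0 := by
    rw [hset, PySem.List.pyGetD_natCast,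
      List.getD_eq_getElem _ _ (by simp), List.getElem_set_self]
  rw [hv0, hset, PySem.List.pySetD_natCast, List.set_set, zero_add]

theorem pvInv0 (PL TL : List Char) :
    pvInv PL.length TL.length 0
      ((List.replicate (PL.length + TL.length + 1) (-1 : Int)).set PL.length
        (pvExtA PL TL 0 0)) := by
  refine ⟨by simp, ?_, ?_⟩
  · intro x hx
    rcases List.mem_or_eq_of_mem_set hx with h | h
    · rw [List.eq_of_mem_replicate h]
    · have := pvExtA_nonneg PL TL 0 0
      omega
  · intro k hk1 hk2
    have hk : k = 0 := by omega
    subst hk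
    rw [add_zero, PySem.List.pyGetD_natCast,
      List.getD_eq_getElem _ _ (by simp), List.getElem_set_self]
    have := pvExtA_nonneg PL TL 0 0
    omega

theorem compute_W_2_eq_alt (P T : String) : compute_W_2 P T = compute_W_2_alt P T := by
  simp only [compute_W_2, compute_W_2_alt, pvFetchA]
  have h0 : PySem.List.pyGetD (List.replicate (T.toList.length + 1)
      (List.replicate (P.toList.length + T.toList.length + 1) (-1 : Int))) 0 [] =
      List.replicate (P.toList.length + T.toList.length + 1) (-1 : Int) := by
    rw [PySem.List.pyGetD_zero, List.replicate_succ, List.getD_cons_zero]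
  rw [h0, pvRow0_eq P.toList T.toList]
  rw [show pvExtB P.toList.length T.toList.length (pvLce T.toList P.toList) 0 0 =
      pvExtA P.toList T.toList 0 0 from (pvExt_eq P.toList T.toList 0 0 le_rfl le_rfl).symm]
  simp only [PySem.List.pySetD_natCast]
  set R0 := (List.replicate (P.toList.length + T.toList.length + 1) (-1 : Int)).set
    P.toList.length (pvExtA P.toList T.toList 0 0) with hR0
  have hW1 : PySem.List.pySetD
      (List.replicate (T.toList.length + 1)
        (List.replicate (P.toList.length + T.toList.length + 1) (-1 : Int))) 0 R0 =
      [R0] ++ List.replicate T.toList.length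
        (List.replicate (P.toList.length + T.toList.length + 1) (-1 : Int)) := by
    rw [pvSet_eq _ _ _ (by simp) (by simp)]
    simp [pvPos, List.replicate_succ]
  rw [hW1]
  by_cases hsucc : PySem.List.pyGetD R0
      ((T.toList.length : Int) - P.toList.length + P.toList.length) (-1) = (T.toList.length : Int)
  · rw [if_pos hsucc, pvLoopB_stop _ _ _ _ _ _ hsucc]
    simp
  · rw [if_neg hsucc]
    have := pvLoop_eq P.toList T.toList P.toList.length T.toList.length rfl rfl
      T.toList.length [] R0 0 rfl (by omega) (pvInv0 P.toList T.toList) hsucc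
    simpa using this

-- ===== VERDICT (by name: the statement is the Claim_ definition above) =====
theorem compute_W_2_spec : Claim_equal_compute_W_2 := by
  unfold Claim_equal_compute_W_2 Spec_compute_W_2
  intro P T _ _
  exact compute_W_2_eq_alt P T
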